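-- pv_equiv track=rewrite | github.com/rohanvinaik/TailChasingFixer | examples/fix_strategies/semantic_duplicate_fix_example.py | update_imports
-- ===== SOURCE A (Python) =====
-- def update_imports(code: str) -> str:
--     """Update import statements to use new function names."""
--     replacements = {
--         'compute_mean': 'calculate_average',
--         'get_avg': 'calculate_average',
--         'find_mean_value': 'calculate_average',
--         'check_email_format': 'validate_email',
--         'is_valid_email': 'validate_email',
--         'load_json_data': 'read_json_file',
--         'get_json_from_file': 'read_json_file',
--     }
--
--     updated_code = code
--     for old_name, new_name in replacements.items():
--         updated_code = updated_code.replace(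
--             f"from module import {old_name}",
--             f"from module import {new_name}"
--         )
--
--     return updated_code
-- ===== SOURCE B (Python) =====
-- def update_imports(code: str) -> str:
--     """Update import statements to use new function names (single left-to-right scan)."""
--     replacements = {
--         'compute_mean': 'calculate_average',
--         'get_avg': 'calculate_average',
--         'find_mean_value': 'calculate_average',
--         'check_email_format': 'validate_email',
--         'is_valid_email': 'validate_email',
--         'load_json_data': 'read_json_file',
--         'get_json_from_file': 'read_json_file',
--     }
--     table = {f"from module import {old}": f"from module import {new}"
--              for old, new in replacements.items()}
--     out = []
--     i = 0
--     n = len(code)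
--     while i < n:
--         for old, new in table.items():
--             if code.startswith(old, i):
--                 out.append(new)
--                 i += len(old)
--                 break
--         else:
--             out.append(code[i])
--             i += 1
--     return ''.join(out)
-- ===== Notes on version B (the rewrite author's own statement) =====
-- stated objective: alternative
-- what changed: Seven sequential whole-string str.replace passes are replaced by one left-to-right scan that tries all seven full import patterns at each position and copies or substitutes once; correctness rests on the patterns being mutually non-overlapping.
import Mathlib
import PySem

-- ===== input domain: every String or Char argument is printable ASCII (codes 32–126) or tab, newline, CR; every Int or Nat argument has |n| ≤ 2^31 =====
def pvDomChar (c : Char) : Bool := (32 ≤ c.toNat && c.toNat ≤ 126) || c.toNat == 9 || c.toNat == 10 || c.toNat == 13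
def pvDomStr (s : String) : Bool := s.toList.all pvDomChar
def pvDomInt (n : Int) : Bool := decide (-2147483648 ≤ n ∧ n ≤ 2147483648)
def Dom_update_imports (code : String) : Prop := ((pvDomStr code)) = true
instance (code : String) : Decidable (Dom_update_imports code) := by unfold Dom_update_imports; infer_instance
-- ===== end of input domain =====

-- B replaces A's seven sequential whole-string str.replace passes by ONE left-to-right scan
-- that tries the seven full patterns at each position (objective: alternative single-pass algorithm).

-- ===== PORT A =====
-- literal port of A: a dict of old->new short names, then a loop of str.replace calls
def update_imports (code : String) : String :=
  let replacements : List (String × String) :=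
    [("compute_mean", "calculate_average"),
     ("get_avg", "calculate_average"),
     ("find_mean_value", "calculate_average"),
     ("check_email_format", "validate_email"),
     ("is_valid_email", "validate_email"),
     ("load_json_data", "read_json_file"),
     ("get_json_from_file", "read_json_file")]
  replacements.foldl
    (fun updated pr =>
      PySem.Str.replace updated ("from module import " ++ pr.1) ("from module import " ++ pr.2))
    code

-- ===== PORT B =====
-- Source B's short-name dict and the derived full-pattern table
def pvRepl : List (String × String) :=
  [("compute_mean", "calculate_average"),
   ("get_avg", "calculate_average"),
   ("find_mean_value", "calculate_average"),
   ("check_email_format", "validate_email"),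
   ("is_valid_email", "validate_email"),
   ("load_json_data", "read_json_file"),
   ("get_json_from_file", "read_json_file")]

def pvTable : List (List Char × List Char) :=
  pvRepl.map (fun pr => (("from module import " ++ pr.1).toList, ("from module import " ++ pr.2).toList))

-- Source B's while loop: at each position emit the first matching pattern's replacement
-- (code.startswith(old, i)) and skip it, else copy one character
def pvScan : List Char → List Char
  | [] => []
  | c :: t =>
    match pvTable.find? (fun pr => pr.1.isPrefixOf (c :: t)) with
    | some pr => pr.2 ++ pvScan (t.drop (pr.1.length - 1))
    | none => c :: pvScan t
termination_by l => l.length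
decreasing_by all_goals (simp [List.length_drop]; try omega)

def update_imports_alt (code : String) : String :=
  String.ofList (pvScan code.toList)

-- ===== PRECONDITION & SPEC =====
def Spec_update_imports (code : String) (out : String) : Prop := out = update_imports_alt code
instance (code : String) (out : String) : Decidable (Spec_update_imports code out) := by unfold Spec_update_imports; infer_instance

-- ===== CLAIM (what is proved, stated in full; the proofs are below) =====
def Claim_equal_update_imports : Prop := ∀ (code : String), Dom_update_imports code → Spec_update_imports code (update_imports code)

-- ===== LEMMAS AND PROOFS =====

-- clean one-pattern scanner equal to PySem.Chars.replace for a nonempty pattern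
def rep1 (p q : List Char) : List Char → List Char
  | [] => []
  | c :: t =>
    if p.isPrefixOf (c :: t) then q ++ rep1 p q (t.drop (p.length - 1))
    else c :: rep1 p q t
termination_by l => l.length
decreasing_by all_goals (simp [List.length_drop]; try omega)

-- sequential application of rep1 over a pattern table (the shape of port A)
def chainR (ps : List (List Char × List Char)) (l : List Char) : List Char :=
  ps.foldl (fun acc pr => rep1 pr.1 pr.2 acc) l

-- no occurrence of p can start inside the block y, whatever text follows y
def SkipOK (y p : List Char) : Prop :=
  ∀ d, d < y.length → ¬ p <+: y.drop d ∧ ¬ y.drop d <+: p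

-- Bool version, so the concrete instances can be checked by `decide`
def skipB (y p : List Char) : Bool :=
  (List.range y.length).all fun d => !p.isPrefixOf (y.drop d) && !(y.drop d).isPrefixOf p

theorem skipB_ok {y p : List Char} (h : skipB y p = true) : SkipOK y p := by
  intro d hd
  have := List.all_eq_true.mp h d (List.mem_range.mpr hd)
  simp only [Bool.and_eq_true, Bool.not_eq_true', ← Bool.not_eq_true] at this
  constructor
  · intro hc; exact this.1 ((List.isPrefixOf_iff_prefix).mpr hc)
  · intro hc; exact this.2 ((List.isPrefixOf_iff_prefix).mpr hc)

-- no suffix of pj is prefix-comparable with p or q (rep1 p q preserves pj-prefix tests)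
def InvOK (pj p q : List Char) : Prop :=
  ∀ d, d < pj.length →
    (¬ pj.drop d <+: p ∧ ¬ p <+: pj.drop d) ∧ (¬ pj.drop d <+: q ∧ ¬ q <+: pj.drop d)

def invB (pj p q : List Char) : Bool :=
  (List.range pj.length).all fun d =>
    (!(pj.drop d).isPrefixOf p && !p.isPrefixOf (pj.drop d)) &&
    (!(pj.drop d).isPrefixOf q && !q.isPrefixOf (pj.drop d))

theorem invB_ok {pj p q : List Char} (h : invB pj p q = true) : InvOK pj p q := by
  intro d hd
  have := List.all_eq_true.mp h d (List.mem_range.mpr hd)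
  simp only [Bool.and_eq_true, Bool.not_eq_true', ← Bool.not_eq_true] at this
  refine ⟨⟨fun hc => this.1.1 ((List.isPrefixOf_iff_prefix).mpr hc),
          fun hc => this.1.2 ((List.isPrefixOf_iff_prefix).mpr hc)⟩,
         ⟨fun hc => this.2.1 ((List.isPrefixOf_iff_prefix).mpr hc),
          fun hc => this.2.2 ((List.isPrefixOf_iff_prefix).mpr hc)⟩⟩

theorem prefix_append_cases {x y z : List Char} (h : x <+: y ++ z) : x <+: y ∨ y <+: x := by
  by_cases hle : x.length ≤ y.length
  · left
    rw [List.prefix_iff_eq_take] at h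
    rw [h, List.take_append_of_le_length hle]
    exact List.take_prefix _ _
  · right
    have hlt : y.length ≤ x.length := by omega
    rw [List.prefix_iff_eq_take] at h
    rw [List.take_append, List.take_of_length_le hlt] at h
    exact ⟨_, h.symm⟩

theorem rep1_nil (p q : List Char) : rep1 p q [] = [] := by simp [rep1]

theorem rep1_cons_of_not {p : List Char} (q : List Char) {c : Char} {t : List Char}
    (h : ¬ p <+: (c :: t)) : rep1 p q (c :: t) = c :: rep1 p q t := by
  rw [rep1, if_neg]
  simpa [List.isPrefixOf_iff_prefix] using h

theorem rep1_fire {p : List Char} (q : List Char) (hp : p ≠ []) (X : List Char) :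
    rep1 p q (p ++ X) = q ++ rep1 p q X := by
  obtain ⟨c, p', rfl⟩ : ∃ c p', p = c :: p' := by
    cases p with
    | nil => exact absurd rfl hp
    | cons c p' => exact ⟨c, p', rfl⟩
  have hpre : (c :: p').isPrefixOf (c :: (p' ++ X)) = true := by
    rw [List.isPrefixOf_iff_prefix]
    exact ⟨X, by simp⟩
  rw [List.cons_append, rep1, if_pos hpre]
  have : (p' ++ X).drop ((c :: p').length - 1) = X := by
    simpa using (List.drop_left (l₁ := p') (l₂ := X))
  rw [this]

theorem go_eq (p q : List Char) (hp : p ≠ []) :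
    ∀ fuel l acc, l.length ≤ fuel →
      PySem.Chars.replace.go p q fuel l acc = acc.reverse ++ rep1 p q l := by
  intro fuel
  induction fuel with
  | zero =>
    intro l acc hl
    have : l = [] := List.eq_nil_of_length_eq_zero (Nat.le_zero.mp hl)
    subst this
    rw [PySem.Chars.replace.go.eq_def]
    simp [rep1_nil]
  | succ f ih =>
    intro l acc hl
    cases l with
    | nil =>
      rw [PySem.Chars.replace.go.eq_def]
      simp [rep1_nil]
    | cons c t =>
      rw [PySem.Chars.replace.go.eq_def]
      simp only []
      by_cases hpre : p.isPrefixOf (c :: t)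
      · rw [if_pos hpre]
        have hplen : 1 ≤ p.length := by
          cases p with
          | nil => exact absurd rfl hp
          | cons _ _ => simp
        have hdrop : List.drop p.length (c :: t) = t.drop (p.length - 1) := by
          obtain ⟨m, hm⟩ : ∃ m, p.length = m + 1 := ⟨p.length - 1, by omega⟩
          rw [hm]; simp
        have hlen : (List.drop p.length (c :: t)).length ≤ f := by
          simp only [List.length_drop, List.length_cons]
          simp only [List.length_cons] at hl
          omega
        rw [ih _ _ hlen, rep1, if_pos hpre, hdrop]
        simp
      · rw [if_neg hpre]
        have hlen : t.length ≤ f := by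
          simp only [List.length_cons] at hl; omega
        rw [ih _ _ hlen, rep1, if_neg hpre]
        simp

theorem replace_eq_rep1 (l p q : List Char) (hp : p ≠ []) :
    PySem.Chars.replace l p q = rep1 p q l := by
  rw [PySem.Chars.replace, if_neg (by simpa [List.isEmpty_iff] using hp)]
  simpa using go_eq p q hp l.length l [] le_rfl

theorem SkipOK_tail {c : Char} {y' p : List Char} (h : SkipOK (c :: y') p) : SkipOK y' p := by
  intro d hd
  have := h (d + 1) (by simp; omega)
  simpa using this

theorem rep1_skip {p : List Char} (q : List Char) (hp : p ≠ []) :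
    ∀ (y : List Char), SkipOK y p → ∀ X, rep1 p q (y ++ X) = y ++ rep1 p q X := by
  intro y
  induction y with
  | nil => intro _ X; simp
  | cons c y' ih =>
    intro h X
    have h0 := h 0 (by simp)
    simp only [List.drop_zero] at h0
    have hnp : ¬ p <+: (c :: y') ++ X := by
      intro hpre
      rcases prefix_append_cases hpre with h1 | h1
      · exact h0.1 h1
      · exact h0.2 h1
    rw [List.cons_append] at hnp ⊢
    rw [rep1_cons_of_not q hnp, ih (SkipOK_tail h) X]
    rfl

-- rep1 p q neither creates nor destroys a pj-suffix prefix-match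
theorem rep1_inv {p q pj : List Char} (hp : p ≠ []) (hinv : InvOK pj p q) :
    ∀ n s d, s.length ≤ n → (pj.drop d <+: rep1 p q s ↔ pj.drop d <+: s) := by
  intro n
  induction n with
  | zero =>
    intro s d hs
    have : s = [] := List.eq_nil_of_length_eq_zero (Nat.le_zero.mp hs)
    subst this
    rw [rep1_nil]
  | succ m ih =>
    intro s d hs
    by_cases hd : pj.length ≤ d
    · rw [List.drop_eq_nil_of_le hd]
      simp
    · push_neg at hd
      cases s with
      | nil => rw [rep1_nil]
      | cons c t =>
        have hu := hinv d hd
        by_cases hpre : p <+: (c :: t)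
        · obtain ⟨rest, hrest⟩ := hpre
          rw [← hrest, rep1_fire q hp]
          constructor
          · intro h
            rcases prefix_append_cases h with h1 | h1
            · exact absurd h1 hu.2.1
            · exact absurd h1 hu.2.2
          · intro h
            rcases prefix_append_cases h with h1 | h1
            · exact absurd h1 hu.1.1
            · exact absurd h1 hu.1.2
        · rw [rep1_cons_of_not q hpre]
          have hcons : pj.drop d = pj[d] :: pj.drop (d + 1) :=
            List.drop_eq_getElem_cons hd
          rw [hcons]
          have ht : t.length ≤ m := by
            simp only [List.length_cons] at hs; omega
          have := ih t (d + 1) ht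
          constructor
          · intro h
            rw [List.cons_prefix_cons] at h ⊢
            exact ⟨h.1, by rw [← this]; exact h.2⟩
          · intro h
            rw [List.cons_prefix_cons] at h ⊢
            exact ⟨h.1, by rw [this]; exact h.2⟩

theorem chainR_nil (ps : List (List Char × List Char)) : chainR ps [] = [] := by
  induction ps with
  | nil => rfl
  | cons a ps' ih =>
    simp only [chainR, List.foldl_cons] at *
    rw [rep1_nil]
    exact ih

theorem chainR_skip (ps : List (List Char × List Char)) (y : List Char)
    (h : ∀ pr ∈ ps, pr.1 ≠ [] ∧ SkipOK y pr.1) :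
    ∀ X, chainR ps (y ++ X) = y ++ chainR ps X := by
  induction ps with
  | nil => intro X; rfl
  | cons a ps' ih =>
    intro X
    have ha := h a (by simp)
    simp only [chainR, List.foldl_cons]
    rw [rep1_skip a.2 ha.1 y ha.2 X]
    exact ih (fun pr hpr => h pr (by simp [hpr])) (rep1 a.1 a.2 X)

theorem chainR_cons (ps : List (List Char × List Char)) (c : Char)
    (hne : ∀ pr ∈ ps, pr.1 ≠ [])
    (hpair : List.Pairwise (fun a b => InvOK b.1 a.1 a.2) ps) :
    ∀ t, (∀ pr ∈ ps, ¬ pr.1 <+: (c :: t)) →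
      chainR ps (c :: t) = c :: chainR ps t := by
  induction ps with
  | nil => intro t _; rfl
  | cons a ps' ih =>
    intro t hnp
    have ha := hnp a (by simp)
    have hane : a.1 ≠ [] := hne a (by simp)
    simp only [chainR, List.foldl_cons]
    rw [rep1_cons_of_not a.2 ha]
    have hpair' := (List.pairwise_cons.mp hpair).2
    have hinvs := (List.pairwise_cons.mp hpair).1
    have hnp' : ∀ pr ∈ ps', ¬ pr.1 <+: (c :: rep1 a.1 a.2 t) := by
      intro pr hpr hcontra
      have heq : (c :: rep1 a.1 a.2 t) = rep1 a.1 a.2 (c :: t) :=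
        (rep1_cons_of_not a.2 ha).symm
      rw [heq] at hcontra
      have := (rep1_inv hane (hinvs pr hpr) (c :: t).length (c :: t) 0 le_rfl)
      simp only [List.drop_zero] at this
      exact hnp pr (by simp [hpr]) (this.mp hcontra)
    exact ih (fun pr hpr => hne pr (by simp [hpr])) hpair' (rep1 a.1 a.2 t) hnp'

-- the finite side conditions about the seven concrete patterns
theorem tbl_ne : ∀ pr ∈ pvTable, pr.1 ≠ [] := by decide
theorem tbl_skip1 : ∀ a ∈ pvTable, ∀ b ∈ pvTable, a.1 ≠ b.1 → SkipOK b.1 a.1 := by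
  have hall : (pvTable.all fun a => pvTable.all fun b => (a.1 == b.1) || skipB b.1 a.1) = true := by
    decide
  intro a ha b hb hne
  have h1 := List.all_eq_true.mp (List.all_eq_true.mp hall a ha) b hb
  rw [Bool.or_eq_true] at h1
  rcases h1 with h1 | h1
  · exact absurd (by simpa using h1) hne
  · exact skipB_ok h1
theorem tbl_skip2 : ∀ a ∈ pvTable, ∀ b ∈ pvTable, SkipOK b.2 a.1 := by
  have hall : (pvTable.all fun a => pvTable.all fun b => skipB b.2 a.1) = true := by decide
  intro a ha b hb
  exact skipB_ok (List.all_eq_true.mp (List.all_eq_true.mp hall a ha) b hb)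
theorem tbl_inv : List.Pairwise (fun a b => InvOK b.1 a.1 a.2) pvTable := by
  have h : List.Pairwise (fun a b => invB b.1 a.1 a.2 = true) pvTable := by decide
  exact h.imp (fun hab => invB_ok hab)

theorem chain_eq_scan : ∀ n l, l.length ≤ n → chainR pvTable l = pvScan l := by
  intro n
  induction n with
  | zero =>
    intro l hl
    have : l = [] := List.eq_nil_of_length_eq_zero (Nat.le_zero.mp hl)
    subst this
    rw [chainR_nil, pvScan]
  | succ m ih =>
    intro l hl
    cases l with
    | nil => rw [chainR_nil, pvScan]
    | cons c t =>
      cases hf : pvTable.find? (fun pr => pr.1.isPrefixOf (c :: t)) with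
      | none =>
        rw [pvScan, hf]
        have hnp : ∀ pr ∈ pvTable, ¬ pr.1 <+: (c :: t) := by
          intro pr hpr
          have := List.find?_eq_none.mp hf pr hpr
          simpa [List.isPrefixOf_iff_prefix] using this
        rw [chainR_cons pvTable c tbl_ne tbl_inv t hnp]
        have ht : t.length ≤ m := by simp at hl; omega
        rw [ih t ht]
      | some pr =>
        obtain ⟨hprb, as, bs, htbl, has⟩ := List.find?_eq_some_iff_append.mp hf
        have hpre : pr.1 <+: (c :: t) := (List.isPrefixOf_iff_prefix).mp hprb
        have hprmem : pr ∈ pvTable := by rw [htbl]; simp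
        have hprne : pr.1 ≠ [] := tbl_ne pr hprmem
        obtain ⟨rest, hrest⟩ := hpre
        have hpl : 1 ≤ pr.1.length := by
          cases hpp : pr.1 with
          | nil => exact absurd hpp hprne
          | cons _ _ => simp
        have hdropt : t.drop (pr.1.length - 1) = rest := by
          have h1 : List.drop pr.1.length (pr.1 ++ rest) = rest := List.drop_left
          rw [hrest] at h1
          have hk : pr.1.length = (pr.1.length - 1) + 1 := by omega
          rw [hk, List.drop_succ_cons] at h1
          exact h1
        have hscan : pvScan (c :: t) = pr.2 ++ pvScan (t.drop (pr.1.length - 1)) := by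
          rw [pvScan, hf]
        rw [hscan, hdropt]
        have hrlen : rest.length ≤ m := by
          have : (c :: t).length = pr.1.length + rest.length := by
            rw [← hrest]; simp
          simp only [List.length_cons] at this hl
          omega
        -- split the chain at pr and push the two blocks through
        have hmem_as : ∀ a ∈ as, a ∈ pvTable := by
          intro a haa; rw [htbl]; simp [haa]
        have hmem_bs : ∀ a ∈ bs, a ∈ pvTable := by
          intro a haa; rw [htbl]; simp [haa]
        have hskipP : ∀ a ∈ as, a.1 ≠ [] ∧ SkipOK pr.1 a.1 := by
          intro a haa
          have hamem := hmem_as a haa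
          have hane : a.1 ≠ pr.1 := by
            intro hcontra
            have := has a haa
            simp only [Bool.not_eq_true'] at this
            rw [hcontra] at this
            rw [this] at hprb
            exact Bool.false_ne_true hprb
          exact ⟨tbl_ne a hamem, tbl_skip1 a hamem pr hprmem hane⟩
        have hskipQ : ∀ a ∈ bs, a.1 ≠ [] ∧ SkipOK pr.2 a.1 := by
          intro a haa
          have hamem := hmem_bs a haa
          exact ⟨tbl_ne a hamem, tbl_skip2 a hamem pr hprmem⟩
        calc chainR pvTable (c :: t)
            = chainR bs (rep1 pr.1 pr.2 (chainR as (pr.1 ++ rest))) := by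
              rw [← hrest, htbl]; simp [chainR, List.foldl_append]
          _ = chainR bs (rep1 pr.1 pr.2 (pr.1 ++ chainR as rest)) := by
              rw [chainR_skip as pr.1 hskipP rest]
          _ = chainR bs (pr.2 ++ rep1 pr.1 pr.2 (chainR as rest)) := by
              rw [rep1_fire pr.2 hprne]
          _ = pr.2 ++ chainR bs (rep1 pr.1 pr.2 (chainR as rest)) := by
              rw [chainR_skip bs pr.2 hskipQ]
          _ = pr.2 ++ chainR pvTable rest := by
              rw [htbl]; simp [chainR, List.foldl_append]
          _ = pr.2 ++ pvScan rest := by rw [ih rest hrlen]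

theorem update_toList (code : String) :
    (update_imports code).toList = chainR pvTable code.toList := by
  simp only [update_imports, pvTable, pvRepl, chainR, List.foldl_cons, List.foldl_nil,
    List.map_cons, List.map_nil, PySem.Str.toList_replace]
  rw [replace_eq_rep1 _ _ _ (by decide), replace_eq_rep1 _ _ _ (by decide),
    replace_eq_rep1 _ _ _ (by decide), replace_eq_rep1 _ _ _ (by decide),
    replace_eq_rep1 _ _ _ (by decide), replace_eq_rep1 _ _ _ (by decide),
    replace_eq_rep1 _ _ _ (by decide)]

-- ===== VERDICT (by name: the statement is the Claim_ definition above) =====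
theorem update_imports_spec : Claim_equal_update_imports := by
  intro code _
  unfold Spec_update_imports update_imports_alt
  rw [← chain_eq_scan code.toList.length code.toList le_rfl, ← update_toList]
  exact String.ofList_toList.symm
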